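-- pv_equiv track=rewrite | github.com/mar-garita/LP_ITVDN | week_4/Iterators and generators/Homework_11.py | func_rev
-- ===== SOURCE A (Python) =====
-- def func_rev(start, end=None):
--     if end == None:
--         for i in range(start):
--             yield start
--             start -= 1
--     else:
--         for i in range(start, end):
--             yield end
--             end -= 1
-- ===== SOURCE B (Python) =====
-- def func_rev(start, end=None):
--     # Phase 1: collect the ascending run of values; Phase 2: yield it reversed.
--     if end == None:
--         lo, hi = 1, start + 1
--     else:
--         lo, hi = start + 1, end + 1
--     asc = []
--     x = lo
--     while x < hi:
--         asc.append(x)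
--         x += 1
--     yield from reversed(asc)
-- ===== Notes on version B (the rewrite author's own statement) =====
-- stated objective: alternative
-- what changed: B is a two-phase staged computation: it first builds the ascending run of values with a while loop and then yields that list reversed, instead of A's single counting loop that mutates start/end and yields the decremented accumulator directly.
import Mathlib
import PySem

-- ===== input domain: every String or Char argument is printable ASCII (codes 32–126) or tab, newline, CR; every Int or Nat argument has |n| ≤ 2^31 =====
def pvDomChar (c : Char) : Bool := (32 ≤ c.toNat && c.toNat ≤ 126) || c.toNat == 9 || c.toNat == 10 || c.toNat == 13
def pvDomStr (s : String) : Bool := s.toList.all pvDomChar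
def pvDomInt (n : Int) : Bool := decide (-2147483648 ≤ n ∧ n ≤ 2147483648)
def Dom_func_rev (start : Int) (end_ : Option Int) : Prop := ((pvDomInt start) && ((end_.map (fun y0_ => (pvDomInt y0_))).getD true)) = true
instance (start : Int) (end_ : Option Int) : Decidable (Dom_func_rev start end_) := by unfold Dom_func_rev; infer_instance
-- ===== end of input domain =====

-- B stages the work: build the ascending run with a loop, then emit it reversed — instead of A's counting loop yielding a decremented accumulator; objective: alternative decomposition, same cost.


-- ===== PORT A =====
-- generator consumed to a list; the loops thread a mutable decremented accumulator as in A
def func_rev (start : Int) (end_ : Option Int) : List Int :=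
  match end_ with
  | none =>
      ((PySem.List.pyRange 0 start 1).foldl
        (fun (st : Int × List Int) _ => (st.1 - 1, st.2 ++ [st.1])) (start, [])).2
  | some e =>
      ((PySem.List.pyRange start e 1).foldl
        (fun (st : Int × List Int) _ => (st.1 - 1, st.2 ++ [st.1])) (e, [])).2

-- ===== PORT B =====
-- phase 1 of Source B: the while loop appending the ascending run x = lo, lo+1, … while x < hi
def pvUp (lo hi : Int) (acc : List Int) : List Int :=
  if lo < hi then pvUp (lo + 1) hi (acc ++ [lo]) else acc
termination_by (hi - lo).toNat
decreasing_by omega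

def func_rev_alt (start : Int) (end_ : Option Int) : List Int :=
  match end_ with
  | none => (pvUp 1 (start + 1) []).reverse
  | some e => (pvUp (start + 1) (e + 1) []).reverse

-- ===== PRECONDITION & SPEC =====
def Spec_func_rev (start : Int) (end_ : Option Int) (out : List Int) : Prop := out = func_rev_alt start end_
instance (start : Int) (end_ : Option Int) (out : List Int) : Decidable (Spec_func_rev start end_ out) := by unfold Spec_func_rev; infer_instance

-- ===== CLAIM (what is proved, stated in full; the proofs are below) =====
def Claim_equal_func_rev : Prop := ∀ (start : Int) (end_ : Option Int), Dom_func_rev start end_ → Spec_func_rev start end_ (func_rev start end_)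

-- ===== LEMMAS AND PROOFS =====

-- folding A's yield-loop body over any list of length L starting at s appends s, s-1, …, s-L+1
theorem pvFoldCount (l : List Int) (s : Int) (acc : List Int) :
    (l.foldl (fun (st : Int × List Int) _ => (st.1 - 1, st.2 ++ [st.1])) (s, acc)).2
      = acc ++ PySem.List.pyRange s (s - l.length) (-1) := by
  induction l generalizing s acc with
  | nil => simp [PySem.List.pyRange_neg_one_eq_nil (le_refl s)]
  | cons x t ih =>
      simp only [List.foldl_cons, List.length_cons]
      rw [ih,
          show ((t.length + 1 : Nat) : Int) = (t.length : Int) + 1 by push_cast; ring,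
          PySem.List.pyRange_neg_one_cons (show s - ((t.length : Int) + 1) < s by omega),
          show s - 1 - (t.length : Int) = s - ((t.length : Int) + 1) by ring]
      simp

-- B's while loop builds the ascending range
theorem pvUp_eq (n : Nat) : ∀ (lo hi : Int) (acc : List Int), (hi - lo).toNat = n →
    pvUp lo hi acc = acc ++ PySem.List.pyRange lo hi 1 := by
  induction n with
  | zero =>
      intro lo hi acc h
      rw [pvUp, if_neg (by omega), PySem.List.pyRange_one_eq_nil (by omega)]
      simp
  | succ k ih =>
      intro lo hi acc h
      rw [pvUp, if_pos (by omega), ih (lo + 1) hi (acc ++ [lo]) (by omega),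
          PySem.List.pyRange_one_cons (show lo < hi by omega)]
      simp

theorem func_rev_eq_range (start : Int) (end_ : Option Int) :
    func_rev start end_ = match end_ with
      | none => PySem.List.pyRange start 0 (-1)
      | some e => PySem.List.pyRange e start (-1) := by
  cases end_ with
  | none =>
      simp only [func_rev]
      rw [pvFoldCount, PySem.List.length_pyRange_one]
      by_cases h : start ≤ 0
      · rw [PySem.List.pyRange_neg_one_eq_nil (by omega),
            PySem.List.pyRange_neg_one_eq_nil h]
        rfl
      · rw [List.nil_append, show start - (((start - 0).toNat : Int)) = 0 by omega]
  | some e =>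
      simp only [func_rev]
      rw [pvFoldCount, PySem.List.length_pyRange_one]
      by_cases h : e ≤ start
      · rw [PySem.List.pyRange_neg_one_eq_nil (by omega),
            PySem.List.pyRange_neg_one_eq_nil h]
        rfl
      · rw [List.nil_append, show e - (((e - start).toNat : Int)) = start by omega]

-- ===== VERDICT (by name: the statement is the Claim_ definition above) =====
theorem func_rev_spec : Claim_equal_func_rev := by
  intro start end_ _
  unfold Spec_func_rev
  rw [func_rev_eq_range]
  cases end_ with
  | none =>
      simp only [func_rev_alt]
      rw [pvUp_eq (start + 1 - 1).toNat 1 (start + 1) [] rfl, List.nil_append,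
          PySem.List.pyRange_neg_one_eq_reverse]
      norm_num
  | some e =>
      simp only [func_rev_alt]
      rw [pvUp_eq (e + 1 - (start + 1)).toNat (start + 1) (e + 1) [] rfl, List.nil_append,
          PySem.List.pyRange_neg_one_eq_reverse]
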